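-- pv_equiv track=rewrite | github.com/Fr4nzz/rename_photos_AI | utils/name_calculator.py | _generate_suffixes
-- ===== SOURCE A (Python) =====
-- def _generate_suffixes(group_size: int, mode: str, custom_pattern: list) -> list:
--     """Generates a list of suffixes based on the specified mode."""
--     suffixes = []
--
--     if mode == 'Standard (d, v, d2, v2, ...)':
--         pattern = ['d', 'v']
--         pattern_len = 2
--     elif mode == 'Wing Clips (v1, v2, v3, ...)':
--         # Wing clips don't use a pattern, just a counter.
--         return [f"v{i+1}" for i in range(group_size)]
--     elif mode == 'Custom':
--         pattern = custom_pattern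
--         if not pattern: # Fallback if custom pattern is empty
--             return [f"_{i+1}" for i in range(group_size)]
--         pattern_len = len(pattern)
--     else: # Default/fallback if no mode matches
--         return [f"_{i+1}" for i in range(group_size)]
--
--     for i in range(group_size):
--         round_num = i // pattern_len
--         pattern_idx = i % pattern_len
--         suffix = pattern[pattern_idx]
--         if round_num > 0:
--             suffix += str(round_num + 1)
--         suffixes.append(suffix)
--
--     return suffixes
-- ===== SOURCE B (Python) =====
-- def _generate_suffixes(group_size: int, mode: str, custom_pattern: list) -> list:
--     """Generates a list of suffixes based on the specified mode."""
--     if mode == 'Standard (d, v, d2, v2, ...)':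
--         pattern = ['d', 'v']
--     elif mode == 'Wing Clips (v1, v2, v3, ...)':
--         return [f"v{i+1}" for i in range(group_size)]
--     elif mode == 'Custom':
--         pattern = custom_pattern
--         if not pattern:
--             return [f"_{i+1}" for i in range(group_size)]
--     else:
--         return [f"_{i+1}" for i in range(group_size)]
--
--     plen = len(pattern)
--     rounds = (group_size + plen - 1) // plen
--     out = []
--     for round_num in range(rounds):
--         if round_num == 0:
--             out += pattern
--         else:
--             out += [p + str(round_num + 1) for p in pattern]
--     return out[:group_size]
-- ===== Notes on version B (the rewrite author's own statement) =====
-- stated objective: alternative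
-- what changed: The flat loop that derives each suffix from i//pattern_len and i%pattern_len is replaced by building whole rounds (pattern as-is for round 0, pattern elements with the round number appended afterwards) for a precomputed ceil(group_size/pattern_len) number of rounds, then truncating to group_size; no division/modulo per element.
import Mathlib
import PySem

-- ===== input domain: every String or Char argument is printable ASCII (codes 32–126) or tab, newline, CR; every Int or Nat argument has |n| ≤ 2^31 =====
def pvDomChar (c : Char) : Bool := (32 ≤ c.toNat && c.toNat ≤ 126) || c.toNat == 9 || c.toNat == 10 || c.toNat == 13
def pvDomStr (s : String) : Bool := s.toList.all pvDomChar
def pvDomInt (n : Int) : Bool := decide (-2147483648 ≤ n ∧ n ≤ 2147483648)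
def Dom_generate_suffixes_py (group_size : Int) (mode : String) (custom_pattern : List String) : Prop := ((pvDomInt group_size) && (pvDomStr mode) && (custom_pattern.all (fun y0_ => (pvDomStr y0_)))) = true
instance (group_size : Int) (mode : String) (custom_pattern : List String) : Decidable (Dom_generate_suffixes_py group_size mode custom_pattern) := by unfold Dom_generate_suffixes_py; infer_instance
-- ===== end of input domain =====

-- B replaces A's per-element i//len and i%len computation with a round-by-round build
-- (full rounds, then truncation to group_size): an alternative decomposition, same cost.

-- ===== PORT A =====
-- literal transliteration of A: flat loop over range(group_size), indexing pattern by i % len.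
def generate_suffixes_py (group_size : Int) (mode : String) (custom_pattern : List String) : List String :=
  if mode = "Standard (d, v, d2, v2, ...)" then
    let pattern : List String := ["d", "v"]
    let pattern_len : Int := 2
    (PySem.List.pyRange 0 group_size 1).foldl (fun suffixes i =>
      let round_num := PySem.Int.floordiv i pattern_len
      let pattern_idx := PySem.Int.mod i pattern_len
      let suffix := PySem.List.pyGetD pattern pattern_idx ""   -- index always in range: pattern nonempty
      let suffix := if round_num > 0 then suffix ++ PySem.Int.toStr (round_num + 1) else suffix
      suffixes ++ [suffix]) []
  else if mode = "Wing Clips (v1, v2, v3, ...)" then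
    (PySem.List.pyRange 0 group_size 1).map (fun i => "v" ++ PySem.Int.toStr (i + 1))
  else if mode = "Custom" then
    if custom_pattern = [] then
      (PySem.List.pyRange 0 group_size 1).map (fun i => "_" ++ PySem.Int.toStr (i + 1))
    else
      let pattern := custom_pattern
      let pattern_len : Int := pattern.length
      (PySem.List.pyRange 0 group_size 1).foldl (fun suffixes i =>
        let round_num := PySem.Int.floordiv i pattern_len
        let pattern_idx := PySem.Int.mod i pattern_len
        let suffix := PySem.List.pyGetD pattern pattern_idx ""
        let suffix := if round_num > 0 then suffix ++ PySem.Int.toStr (round_num + 1) else suffix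
        suffixes ++ [suffix]) []
  else
    (PySem.List.pyRange 0 group_size 1).map (fun i => "_" ++ PySem.Int.toStr (i + 1))

-- ===== PORT B =====
-- B-side helper: one loop body per round (round 0 = pattern itself, later rounds numbered).
def pvRoundsLoop (pattern : List String) (rounds : Int) : List String :=
  (PySem.List.pyRange 0 rounds 1).foldl (fun out round_num =>
    if round_num = 0 then out ++ pattern
    else out ++ pattern.map (fun p => p ++ PySem.Int.toStr (round_num + 1))) []

def generate_suffixes_py_alt (group_size : Int) (mode : String) (custom_pattern : List String) : List String :=
  if mode = "Standard (d, v, d2, v2, ...)" then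
    let pattern : List String := ["d", "v"]
    let plen : Int := pattern.length
    let rounds := PySem.Int.floordiv (group_size + plen - 1) plen
    PySem.List.slice (pvRoundsLoop pattern rounds) none (some group_size)
  else if mode = "Wing Clips (v1, v2, v3, ...)" then
    (PySem.List.pyRange 0 group_size 1).map (fun i => "v" ++ PySem.Int.toStr (i + 1))
  else if mode = "Custom" then
    if custom_pattern = [] then
      (PySem.List.pyRange 0 group_size 1).map (fun i => "_" ++ PySem.Int.toStr (i + 1))
    else
      let pattern := custom_pattern
      let plen : Int := pattern.length
      let rounds := PySem.Int.floordiv (group_size + plen - 1) plen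
      PySem.List.slice (pvRoundsLoop pattern rounds) none (some group_size)
  else
    (PySem.List.pyRange 0 group_size 1).map (fun i => "_" ++ PySem.Int.toStr (i + 1))

-- ===== PRECONDITION & SPEC =====
def Spec_generate_suffixes_py (group_size : Int) (mode : String) (custom_pattern : List String) (out : List String) : Prop := out = generate_suffixes_py_alt group_size mode custom_pattern
instance (group_size : Int) (mode : String) (custom_pattern : List String) (out : List String) : Decidable (Spec_generate_suffixes_py group_size mode custom_pattern out) := by unfold Spec_generate_suffixes_py; infer_instance

-- ===== CLAIM (what is proved, stated in full; the proofs are below) =====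
def Claim_equal_generate_suffixes_py : Prop := ∀ (group_size : Int) (mode : String) (custom_pattern : List String), Dom_generate_suffixes_py group_size mode custom_pattern → Spec_generate_suffixes_py group_size mode custom_pattern (generate_suffixes_py group_size mode custom_pattern)

-- ===== LEMMAS AND PROOFS =====

-- the per-index suffix A computes, stated over Nat indices
def pvElem (pattern : List String) (p k : Nat) : String :=
  if (k / p : Nat) > 0 then pattern.getD (k % p) "" ++ PySem.Int.toStr ((k / p : Nat) + 1)
  else pattern.getD (k % p) ""

lemma map_getD_range (pattern : List String) :
    (List.range pattern.length).map (fun j => pattern.getD j "") = pattern := by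
  apply List.ext_getElem
  · simp
  · intro i h1 h2
    simp only [List.getElem_map, List.getElem_range]
    rw [List.getD_eq_getElem?_getD, List.getElem?_eq_getElem h2]
    rfl

lemma pvRound_eq (pattern : List String) (R : Nat) (hp : 0 < pattern.length) :
    (if (R : Int) = 0 then pattern
     else pattern.map (fun p => p ++ PySem.Int.toStr ((R : Int) + 1)))
    = (List.range pattern.length).map (fun j => pvElem pattern pattern.length (R * pattern.length + j)) := by
  set p := pattern.length with hpdef
  have key : ∀ j, j < p → (R * p + j) / p = R ∧ (R * p + j) % p = j := by
    intro j hj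
    constructor
    · rw [Nat.add_comm, Nat.add_mul_div_right _ _ hp, Nat.div_eq_of_lt hj]; omega
    · rw [Nat.add_comm, Nat.add_mul_mod_self_right, Nat.mod_eq_of_lt hj]
  rcases Nat.eq_zero_or_pos R with hR | hR
  · subst hR
    norm_num
    have h0 : ∀ j ∈ List.range p, pvElem pattern p j = pattern.getD j "" := by
      intro j hj
      have hj' : j < p := List.mem_range.mp hj
      simp [pvElem, Nat.div_eq_of_lt hj', Nat.mod_eq_of_lt hj']
    rw [List.map_congr_left h0, map_getD_range]
  · have hRz : ((R : Int)) ≠ 0 := by positivity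
    rw [if_neg hRz]
    apply List.ext_getElem
    · simp [hpdef]
    · intro i h1 h2
      simp only [List.getElem_map, List.getElem_range] at *
      have hi : i < p := by simpa [hpdef] using h1
      have hk := key i hi
      simp only [pvElem, hk.1, hk.2, if_pos hR]
      rw [List.getD_eq_getElem?_getD, List.getElem?_eq_getElem (by omega : i < pattern.length)]
      rfl

lemma flatMap_range_eq (pattern : List String) (hp : 0 < pattern.length) (R : Nat) :
    (List.range R).flatMap (fun (r : Nat) =>
      if (r : Int) = 0 then pattern
      else pattern.map (fun p => p ++ PySem.Int.toStr ((r : Int) + 1)))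
    = (List.range (R * pattern.length)).map (fun k => pvElem pattern pattern.length k) := by
  induction R with
  | zero => simp
  | succ R ih =>
    rw [List.range_succ, List.flatMap_append, ih, List.flatMap_singleton,
        pvRound_eq pattern R hp, Nat.succ_mul, List.range_add, List.map_append, List.map_map]
    rfl

-- the main-branch equality, generic in the (nonempty) pattern
lemma take_range_map (f : Nat → String) (n m : Nat) (h : n ≤ m) :
    ((List.range m).map f).take n = (List.range n).map f := by
  rw [← List.map_take, List.take_range, Nat.min_eq_left h]

lemma main_branch_eq (pattern : List String) (hp : pattern ≠ []) (gs : Int) :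
    (PySem.List.pyRange 0 gs 1).foldl (fun suffixes i =>
      let round_num := PySem.Int.floordiv i (pattern.length : Int)
      let pattern_idx := PySem.Int.mod i (pattern.length : Int)
      let suffix := PySem.List.pyGetD pattern pattern_idx ""
      let suffix := if round_num > 0 then suffix ++ PySem.Int.toStr (round_num + 1) else suffix
      suffixes ++ [suffix]) []
    = PySem.List.slice (pvRoundsLoop pattern (PySem.Int.floordiv (gs + (pattern.length : Int) - 1) (pattern.length : Int))) none (some gs) := by
  have hplen : 0 < pattern.length := List.length_pos_iff.mpr hp
  set p := pattern.length with hpdef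
  -- A side: the flat loop is a map over range(gs)
  rw [PySem.List.foldl_append_singleton_eq_map, List.nil_append, PySem.List.pyRange_one 0 gs]
  rw [List.map_map]
  -- B side: the round loop is a flatMap over range(rounds)
  have hbody : (fun (out : List String) (round_num : Int) =>
        if round_num = 0 then out ++ pattern
        else out ++ pattern.map (fun q => q ++ PySem.Int.toStr (round_num + 1)))
      = (fun (out : List String) (round_num : Int) =>
        out ++ (if round_num = 0 then pattern
          else pattern.map (fun q => q ++ PySem.Int.toStr (round_num + 1)))) := by
    funext o r; split <;> rfl
  rw [pvRoundsLoop, hbody, PySem.List.foldl_append_eq_flatMap, List.nil_append]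
  by_cases hgs' : gs ≤ 0
  · -- empty group: both sides are []
    have hgs : gs ≤ 0 := hgs'
    have h1 : (gs - 0).toNat = 0 := by omega
    have h2 : PySem.Int.floordiv (gs + (p : Int) - 1) (p : Int) ≤ 0 := by
      have := (PySem.Int.floordiv_lt_iff_lt_mul (a := gs + (p : Int) - 1) (b := (p : Int)) (q := 1) (by exact_mod_cast hplen)).mpr (by omega)
      omega
    rw [h1, PySem.List.pyRange_one_eq_nil h2]
    simp [PySem.List.slice, PySem.List.clampIdx]
  · -- positive group size
    have hgs : 0 < gs := by omega
    have hgsn : gs = ((gs.toNat : Nat) : Int) := by omega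
    set n := gs.toNat with hn
    set R := (n + p - 1) / p with hR
    have hcast : gs + (p : Int) - 1 = ((n + p - 1 : Nat) : Int) := by omega
    have hfd : PySem.Int.floordiv (gs + (p : Int) - 1) (p : Int) = (R : Int) := by
      rw [hcast]; exact_mod_cast PySem.Int.floordiv_natCast (n + p - 1) p
    have hgs0 : (gs - 0).toNat = n := by rw [Int.sub_zero]
    rw [hfd, PySem.List.pyRange_one 0 (R : Int), hgs0]
    have hR0 : (((R : Int)) - 0).toNat = R := by simp
    rw [hR0, List.flatMap_map]
    simp only [Function.comp_def, zero_add]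
    rw [flatMap_range_eq pattern hplen R, PySem.List.slice_to _ (by omega)]
    have hnle : n ≤ R * p := by
      have hdm := Nat.div_add_mod (n + p - 1) p
      have hlt := Nat.mod_lt (n + p - 1) hplen
      nlinarith [hdm, hlt]
    rw [← hn, take_range_map _ _ _ hnle]
    apply List.map_congr_left
    intro k hk
    have hkn : k < n := List.mem_range.mp hk
    simp only [pvElem]
    rw [PySem.Int.floordiv_natCast, PySem.Int.mod_natCast, PySem.List.pyGetD_natCast]
    have hiff : ((k / p : Nat) : Int) > 0 ↔ (k / p : Nat) > 0 := by exact_mod_cast Iff.rfl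
    by_cases hq : (k / p : Nat) > 0
    · rw [if_pos (hiff.mpr hq), if_pos hq]
    · rw [if_neg (fun hh => hq (hiff.mp hh)), if_neg hq]

theorem generate_suffixes_py_spec : Claim_equal_generate_suffixes_py := by
  unfold Claim_equal_generate_suffixes_py
  intro gs mode cp _
  unfold Spec_generate_suffixes_py generate_suffixes_py generate_suffixes_py_alt
  by_cases h1 : mode = "Standard (d, v, d2, v2, ...)"
  · simp only [if_pos h1]
    exact main_branch_eq ["d", "v"] (by simp) gs
  · rw [if_neg h1, if_neg h1]
    by_cases h2 : mode = "Wing Clips (v1, v2, v3, ...)"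
    · rw [if_pos h2, if_pos h2]
    · rw [if_neg h2, if_neg h2]
      by_cases h3 : mode = "Custom"
      · rw [if_pos h3, if_pos h3]
        by_cases h4 : cp = []
        · rw [if_pos h4, if_pos h4]
        · rw [if_neg h4, if_neg h4]
          exact main_branch_eq cp h4 gs
      · rw [if_neg h3, if_neg h3]
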